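-- pv_equiv track=rewrite | github.com/nadineelnaggar/NeSy_2021 | Dyck 1 Counter/Dyck1_Generator.py | generateLabelledDataset
-- ===== SOURCE A (Python) =====
-- class Dyck1_Generator(object):
--     def generateParenthesis(self, n):
--         def generate(A = []):
--             if len(A) == 2*n:
--                 if valid(A):
--                     val.append("".join(A))
--                 else:
--                     inval.append("".join(A))
--             else:
--                 A.append('(')
--                 generate(A)
--                 A.pop()
--                 A.append(')')
--                 generate(A)
--                 A.pop()
--
--         def valid(A):
--             bal = 0
--             for c in A:
--                 if c == '(': bal += 1
--                 else: bal -= 1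
--                 if bal < 0: return False
--             return bal == 0
--
--         val = []
--         inval = []
--         generate()
--         return val, inval
--
-- def generateDataset(n_bracket_pairs):
--     gen = Dyck1_Generator()
--     # d1_valid, d1_invalid = gen.generateParenthesis(3)
--     d1_valid = []
--     d1_invalid = []
--     for i in range(1,n_bracket_pairs+1):
--         x,y = gen.generateParenthesis(i)
--         for elem in x:
--             d1_valid.append(elem)
--         for elem in y:
--             d1_invalid.append(elem)
--     return d1_valid,d1_invalid
--
-- def generateLabelledDataset(n_bracket_pairs):
--     d1_valid, d1_invalid = generateDataset(n_bracket_pairs)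
--     dataset = []
--     for elem in d1_valid:
--         entry = (elem, 'valid')
--         dataset.append(entry)
--     for elem in d1_invalid:
--         entry = (elem,'invalid')
--         dataset.append(entry)
--     return dataset
-- ===== SOURCE B (Python) =====
-- def _ok(s):
--     bal = mn = 0
--     for c in s:
--         bal += 1 if c == '(' else -1
--         if bal < mn:
--             mn = bal
--     return bal == 0 and mn >= 0
--
-- def generateLabelledDataset(n_bracket_pairs):
--     valid, invalid = [], []
--     for i in range(1, n_bracket_pairs + 1):
--         strs = ['']
--         for _ in range(2 * i):
--             strs = [s + c for s in strs for c in '()']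
--         for s in strs:
--             (valid if _ok(s) else invalid).append(s)
--     return [(s, 'valid') for s in valid] + [(s, 'invalid') for s in invalid]
-- ===== Notes on version B (the rewrite author's own statement) =====
-- stated objective: alternative
-- what changed: Replaces A's recursive backtracking DFS over a shared mutable char buffer (with an early-return validity scan) by an iterative product enumeration that repeatedly extends a list of strings by '(' and ')' and classifies each string with a single-pass minimum-prefix-balance test, producing the identical list and order.
import Mathlib
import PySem

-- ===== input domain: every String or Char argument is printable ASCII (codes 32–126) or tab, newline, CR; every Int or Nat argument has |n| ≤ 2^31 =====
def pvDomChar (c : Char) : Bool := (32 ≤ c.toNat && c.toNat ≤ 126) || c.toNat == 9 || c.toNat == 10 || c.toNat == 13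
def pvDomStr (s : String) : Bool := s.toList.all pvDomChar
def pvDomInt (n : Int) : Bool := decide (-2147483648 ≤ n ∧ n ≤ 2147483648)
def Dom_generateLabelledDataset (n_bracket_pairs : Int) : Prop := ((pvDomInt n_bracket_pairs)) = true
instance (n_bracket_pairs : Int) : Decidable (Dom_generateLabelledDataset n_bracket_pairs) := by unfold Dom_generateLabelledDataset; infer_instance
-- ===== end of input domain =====

-- B replaces A's recursive backtracking DFS (build/pop a shared char buffer, early-return
-- validity check) by an iterative product enumeration (repeatedly extending a list of strings
-- by '(' and ')') with a single-pass minimum-prefix-balance validity test: an alternative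
-- decomposition of the same exhaustive generation, same output and order.

-- ===== PORT A =====
-- inner helper `valid` of generateParenthesis: early-return balance scan
def pvGoValid (bal : Int) : List Char → Bool
  | [] => bal == 0
  | c :: cs =>
    let bal' := if c == '(' then bal + 1 else bal - 1
    if bal' < 0 then false else pvGoValid bal' cs

def pvValid (A : List Char) : Bool := pvGoValid 0 A

-- inner helper `generate`: Python recurses until len(A) == 2*n; `fuel` is the number of
-- characters still to append (2*n - len(A)), which makes the same recursion structural
def pvGen (fuel : Nat) (cur : List Char) (st : List String × List String) :
    List String × List String :=
  match fuel with
  | 0 => if pvValid cur then (st.1 ++ [String.ofList cur], st.2) else (st.1, st.2 ++ [String.ofList cur])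
  | f + 1 => pvGen f (cur ++ [')']) (pvGen f (cur ++ ['(']) st)

def pvGenerateParenthesis (n : Int) : List String × List String :=
  pvGen (2 * n).toNat [] ([], [])

def pvGenerateDataset (n_bracket_pairs : Int) : List String × List String :=
  (PySem.List.pyRange 1 (n_bracket_pairs + 1) 1).foldl
    (fun (acc : List String × List String) i =>
      let p := pvGenerateParenthesis i
      (acc.1 ++ p.1, acc.2 ++ p.2)) ([], [])

def generateLabelledDataset (n_bracket_pairs : Int) : List (String × String) :=
  let d := pvGenerateDataset n_bracket_pairs
  d.1.map (fun s => (s, "valid")) ++ d.2.map (fun s => (s, "invalid"))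

-- ===== PORT B =====
-- _ok: one-pass scan keeping (balance, minimum prefix balance)
def pvScan (st : Int × Int) : List Char → Int × Int
  | [] => st
  | c :: cs =>
    let b := st.1 + (if c == '(' then 1 else -1)
    pvScan (b, if b < st.2 then b else st.2) cs

def pvOk (s : String) : Bool :=
  let r := pvScan (0, 0) s.toList
  r.1 == 0 && decide (0 ≤ r.2)

-- strs = [s + c for s in strs for c in '()']
def pvExtend (strs : List String) : List String :=
  strs.flatMap (fun s => ['(', ')'].map (fun c => s.push c))

-- the `for _ in range(2*i)` loop starting from ['']
def pvAllStrs : Nat → List String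
  | 0 => [""]
  | m + 1 => pvExtend (pvAllStrs m)

-- for s in strs: (valid if _ok(s) else invalid).append(s)
def pvClassify (acc : List String × List String) (strs : List String) :
    List String × List String :=
  strs.foldl (fun acc s => if pvOk s then (acc.1 ++ [s], acc.2) else (acc.1, acc.2 ++ [s])) acc

def generateLabelledDataset_alt (n_bracket_pairs : Int) : List (String × String) :=
  let acc := (PySem.List.pyRange 1 (n_bracket_pairs + 1) 1).foldl
    (fun (acc : List String × List String) i =>
      pvClassify acc (pvAllStrs (2 * i).toNat)) ([], [])
  acc.1.map (fun s => (s, "valid")) ++ acc.2.map (fun s => (s, "invalid"))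

-- ===== PRECONDITION & SPEC =====
def Spec_generateLabelledDataset (n_bracket_pairs : Int) (out : List (String × String)) : Prop := out = generateLabelledDataset_alt n_bracket_pairs
instance (n_bracket_pairs : Int) (out : List (String × String)) : Decidable (Spec_generateLabelledDataset n_bracket_pairs out) := by unfold Spec_generateLabelledDataset; infer_instance

-- ===== CLAIM (what is proved, stated in full; the proofs are below) =====
def Claim_equal_generateLabelledDataset : Prop := ∀ (n_bracket_pairs : Int), Dom_generateLabelledDataset n_bracket_pairs → Spec_generateLabelledDataset n_bracket_pairs (generateLabelledDataset n_bracket_pairs)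

-- ===== LEMMAS AND PROOFS =====

-- the tree of suffix extensions A's DFS walks, as a list in DFS order
def pvExts : Nat → List Char → List (List Char)
  | 0, cur => [cur]
  | f + 1, cur => pvExts f (cur ++ ['(']) ++ pvExts f (cur ++ [')'])

theorem pvGen_eq (f : Nat) : ∀ (cur : List Char) (st : List String × List String),
    pvGen f cur st =
      (st.1 ++ ((pvExts f cur).filter pvValid).map String.ofList,
       st.2 ++ ((pvExts f cur).filter (fun l => !pvValid l)).map String.ofList) := by
  induction f with
  | zero =>
    intro cur st
    simp [pvGen, pvExts]
    by_cases h : pvValid cur = true <;> simp [h]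
  | succ f ih =>
    intro cur st
    simp [pvGen, pvExts, ih, List.filter_append, List.map_append, List.append_assoc]

-- extending every string at the end coincides with branching on the next char in the DFS
theorem pvExts_succ_flatMap (f : Nat) : ∀ (cur : List Char),
    pvExts (f + 1) cur = (pvExts f cur).flatMap (fun l => [l ++ ['('], l ++ [')']]) := by
  induction f with
  | zero => intro cur; simp [pvExts]
  | succ f ih =>
    intro cur
    show pvExts (f+1) (cur ++ ['(']) ++ pvExts (f+1) (cur ++ [')']) = _
    rw [ih, ih]
    simp [pvExts, List.flatMap_append]

theorem pvPush_ofList (l : List Char) (c : Char) :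
    (String.ofList l).push c = String.ofList (l ++ [c]) := by
  rw [String.push_eq_append, String.ofList_append, String.singleton_eq_ofList]

theorem pvAllStrs_eq (m : Nat) : pvAllStrs m = (pvExts m []).map String.ofList := by
  induction m with
  | zero => simp [pvAllStrs, pvExts]
  | succ m ih =>
    rw [pvAllStrs, ih, pvExts_succ_flatMap]
    simp only [pvExtend, List.flatMap_map, List.map_flatMap]
    apply List.flatMap_congr
    intro l _
    simp only [List.map_cons, List.map_nil, pvPush_ofList]

theorem pvIfMin (m b : Int) : (if b < m then b else m) = min m b := by
  rw [min_def]; split_ifs <;> omega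

theorem pvScan_min_le (l : List Char) : ∀ (st : Int × Int), (pvScan st l).2 ≤ st.2 := by
  induction l with
  | nil => intro st; simp [pvScan]
  | cons c cs ih =>
    intro st
    simp only [pvScan, pvIfMin]
    exact le_trans (ih _) (min_le_left _ _)

theorem pvGoValid_eq_scan (l : List Char) : ∀ (bal mn : Int), 0 ≤ bal → 0 ≤ mn →
    pvGoValid bal l = ((pvScan (bal, mn) l).1 == 0 && decide (0 ≤ (pvScan (bal, mn) l).2)) := by
  induction l with
  | nil =>
    intro bal mn hb hm
    simp [pvGoValid, pvScan]
    omega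
  | cons c cs ih =>
    intro bal mn hb hm
    by_cases h : c == '('
    · have hb1 : ¬ (bal + 1 < 0) := by omega
      simp only [pvGoValid, pvScan, pvIfMin, h, if_true, hb1, if_false]
      exact ih (bal + 1) _ (by omega) (le_min hm (by omega))
    · rw [Bool.not_eq_true] at h
      simp only [pvGoValid, pvScan, pvIfMin, h, Bool.false_eq_true, if_false]
      have e : bal + -1 = bal - 1 := by ring
      simp only [e]
      by_cases h2 : bal - 1 < 0
      · rw [if_pos h2]
        have hmin : (pvScan (bal - 1, min mn (bal - 1)) cs).2 ≤ min mn (bal - 1) :=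
          pvScan_min_le cs _
        have hneg : ¬ (0 ≤ (pvScan (bal - 1, min mn (bal - 1)) cs).2) := by
          have := min_le_right mn (bal - 1); omega
        simp [hneg]
      · rw [if_neg h2]
        exact ih (bal - 1) _ (by omega) (le_min hm (by omega))

theorem pvOk_ofList (l : List Char) : pvOk (String.ofList l) = pvValid l := by
  rw [pvOk, pvValid, String.toList_ofList, pvGoValid_eq_scan l 0 0 le_rfl le_rfl]

theorem pvClassify_eq (strs : List String) : ∀ (acc : List String × List String),
    pvClassify acc strs =
      (acc.1 ++ strs.filter pvOk, acc.2 ++ strs.filter (fun s => !pvOk s)) := by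
  induction strs with
  | nil => intro acc; simp [pvClassify]
  | cons s ss ih =>
    intro acc
    rw [pvClassify, List.foldl_cons, ← pvClassify]
    by_cases h : pvOk s = true <;>
      simp [ih, h, List.append_assoc]

theorem pvStep_eq (i : Int) :
    pvGenerateParenthesis i =
      ((pvAllStrs (2 * i).toNat).filter pvOk,
       (pvAllStrs (2 * i).toNat).filter (fun s => !pvOk s)) := by
  rw [pvGenerateParenthesis, pvGen_eq, pvAllStrs_eq]
  simp [List.filter_map, Function.comp_def, pvOk_ofList]

-- ===== VERDICT (by name: the statement is the Claim_ definition above) =====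
theorem generateLabelledDataset_spec : Claim_equal_generateLabelledDataset := by
  intro n _
  show generateLabelledDataset n = generateLabelledDataset_alt n
  have hf : (fun (acc : List String × List String) i =>
      let p := pvGenerateParenthesis i
      (acc.1 ++ p.1, acc.2 ++ p.2)) =
      (fun (acc : List String × List String) (i : Int) =>
      pvClassify acc (pvAllStrs (2 * i).toNat)) := by
    funext acc i
    simp only [pvStep_eq, pvClassify_eq]
  rw [generateLabelledDataset, generateLabelledDataset_alt, pvGenerateDataset, hf]
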